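-- pv_equiv track=rewrite | github.com/Kolade-Amire/stock-yard | app/services/yfinance_service.py | _format_holder_metric_label
-- ===== SOURCE A (Python) =====
-- def _format_holder_metric_label(value: str) -> str:
--     normalized = value.replace("_", " ").strip()
--     if not normalized:
--         return value
--     words: list[str] = []
--     current = normalized[0]
--     for char in normalized[1:]:
--         if char.isupper() and current and not current[-1].isupper():
--             words.append(current)
--             current = char
--         else:
--             current += char
--     words.append(current)
--     return " ".join(word.capitalize() for word in words)
-- ===== SOURCE B (Python) =====
-- def _format_holder_metric_label(value: str) -> str:
--     normalized = value.replace("_", " ").strip()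
--     if not normalized:
--         return value
--     # build the word segments back-to-front: walk right-to-left, starting a new
--     # segment at each lowercase->uppercase boundary, prepending otherwise
--     segs = [normalized[-1]]
--     for i in range(len(normalized) - 2, -1, -1):
--         p, c = normalized[i], normalized[i + 1]
--         if c.isupper() and not p.isupper():
--             segs.insert(0, p)
--         else:
--             segs[0] = p + segs[0]
--     return " ".join(w[:1].upper() + w[1:].lower() for w in segs)
-- ===== Notes on version B (the rewrite author's own statement) =====
-- stated objective: alternative
-- what changed: B walks the normalized string right-to-left and builds the word segments back-to-front (new segment at each non-upper->upper boundary, otherwise prepend to the first segment), replacing A's forward words/current accumulator and str.capitalize with explicit slicing.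
import Mathlib
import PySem

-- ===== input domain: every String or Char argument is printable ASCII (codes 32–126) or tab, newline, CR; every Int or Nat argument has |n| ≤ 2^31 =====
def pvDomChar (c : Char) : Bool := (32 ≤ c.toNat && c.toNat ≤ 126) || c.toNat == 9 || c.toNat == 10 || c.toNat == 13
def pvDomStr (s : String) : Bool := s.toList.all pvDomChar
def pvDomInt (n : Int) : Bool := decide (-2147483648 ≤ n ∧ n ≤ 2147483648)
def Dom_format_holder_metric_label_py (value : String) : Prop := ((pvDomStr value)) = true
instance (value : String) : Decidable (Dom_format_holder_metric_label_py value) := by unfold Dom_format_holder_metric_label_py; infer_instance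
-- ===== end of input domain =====

-- B rebuilds the word segments back-to-front (right-to-left walk, no running-word
-- accumulator) instead of A's forward words/current accumulator: an alternative
-- decomposition of the same cost.

-- ===== PORT A =====
-- word.capitalize(): first char uppercased, the rest lowercased (exact on ASCII)
def pvCapitalize (w : List Char) : List Char :=
  match w with
  | [] => []
  | c :: r => PySem.Chars.upperChar c :: PySem.Chars.lower r

def format_holder_metric_label_py (value : String) : String :=
  let normalized := PySem.Chars.strip (PySem.Chars.replace value.toList ['_'] [' '])
  match normalized with
  | [] => value              -- "if not normalized: return value"
  | c0 :: rest =>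
    -- state = (words, current); current[-1] guarded by "current" nonempty as in A
    let st := rest.foldl
      (fun (st : List (List Char) × List Char) ch =>
        if PySem.Chars.isupper ch && !st.2.isEmpty && !PySem.Chars.isupper (st.2.getLastD ' ')
        then (st.1 ++ [st.2], [ch])
        else (st.1, st.2 ++ [ch]))
      ([], [c0])
    String.mk (PySem.Chars.join [' '] ((st.1 ++ [st.2]).map pvCapitalize))

-- ===== PORT B =====
def format_holder_metric_label_py_alt (value : String) : String :=
  let normalized := PySem.Chars.strip (PySem.Chars.replace value.toList ['_'] [' '])
  match normalized with
  | [] => value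
  | c0 :: rest =>
    -- the reversed index loop over pairs (normalized[i], normalized[i+1]) is the
    -- foldr over the adjacent-pairs list, seeded with [normalized[-1]]
    let segs := ((c0 :: rest).zip rest).foldr
      (fun pc acc =>
        if PySem.Chars.isupper pc.2 && !PySem.Chars.isupper pc.1
        then [pc.1] :: acc
        else (pc.1 :: acc.headD []) :: acc.tail)
      [[(c0 :: rest).getLast (by simp)]]
    -- w[:1].upper() + w[1:].lower(); w[:1] = take 1, w[1:] = drop 1 (slice_toNat)
    String.mk (PySem.Chars.join [' ']
      (segs.map (fun w => PySem.Chars.upper (w.take 1) ++ PySem.Chars.lower (w.drop 1))))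

-- ===== PRECONDITION & SPEC =====
def Spec_format_holder_metric_label_py (value : String) (out : String) : Prop := out = format_holder_metric_label_py_alt value
instance (value : String) (out : String) : Decidable (Spec_format_holder_metric_label_py value out) := by unfold Spec_format_holder_metric_label_py; infer_instance

-- ===== CLAIM (what is proved, stated in full; the proofs are below) =====
def Claim_equal_format_holder_metric_label_py : Prop := ∀ (value : String), Dom_format_holder_metric_label_py value → Spec_format_holder_metric_label_py value (format_holder_metric_label_py value)

-- ===== LEMMAS AND PROOFS =====

/-- Common segmentation recursion both loops compute. -/
def pvSegs : Char → List Char → List (List Char)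
  | a, [] => [[a]]
  | a, c :: t =>
    if PySem.Chars.isupper c && !PySem.Chars.isupper a
    then [a] :: pvSegs c t
    else (a :: (pvSegs c t).headD []) :: (pvSegs c t).tail

theorem pvSegs_cons_head_tail (a : Char) (t : List Char) :
    (pvSegs a t).headD [] :: (pvSegs a t).tail = pvSegs a t := by
  cases t with
  | nil => rfl
  | cons c t =>
    simp only [pvSegs]
    split <;> rfl

theorem pvB_eq (a : Char) (rest : List Char) :
    ((a :: rest).zip rest).foldr
      (fun pc acc =>
        if PySem.Chars.isupper pc.2 && !PySem.Chars.isupper pc.1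
        then [pc.1] :: acc
        else (pc.1 :: acc.headD []) :: acc.tail)
      [[(a :: rest).getLast (by simp)]] = pvSegs a rest := by
  induction rest generalizing a with
  | nil => rfl
  | cons c t ih =>
    have hlast : (a :: c :: t).getLast (by simp) = (c :: t).getLast (by simp) :=
      List.getLast_cons (by simp)
    simp only [List.zip_cons_cons, List.foldr_cons, hlast, ih, pvSegs]

theorem pvA_eq (rest : List Char) : ∀ (ws : List (List Char)) (pre : List Char) (a : Char),
    (rest.foldl
      (fun (st : List (List Char) × List Char) ch =>
        if PySem.Chars.isupper ch && !st.2.isEmpty && !PySem.Chars.isupper (st.2.getLastD ' ')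
        then (st.1 ++ [st.2], [ch])
        else (st.1, st.2 ++ [ch]))
      (ws, pre ++ [a])).1 ++
    [(rest.foldl
      (fun (st : List (List Char) × List Char) ch =>
        if PySem.Chars.isupper ch && !st.2.isEmpty && !PySem.Chars.isupper (st.2.getLastD ' ')
        then (st.1 ++ [st.2], [ch])
        else (st.1, st.2 ++ [ch]))
      (ws, pre ++ [a])).2]
    = ws ++ ((pre ++ (pvSegs a rest).headD []) :: (pvSegs a rest).tail) := by
  induction rest with
  | nil => intro ws pre a; simp [pvSegs]
  | cons ch t ih =>
    intro ws pre a
    have hne : (pre ++ [a]).isEmpty = false := by simp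
    have hlast : (pre ++ [a]).getLastD ' ' = a := by simp
    simp only [List.foldl_cons, hne, hlast, Bool.not_false, Bool.and_true]
    by_cases hb : (PySem.Chars.isupper ch && !PySem.Chars.isupper a) = true
    · rw [if_pos hb]
      have h2 := ih (ws ++ [pre ++ [a]]) [] ch
      simp only [List.nil_append] at h2
      rw [h2]
      simp [pvSegs, hb]
      simpa using pvSegs_cons_head_tail ch t
    · rw [if_neg hb]
      rw [ih ws (pre ++ [a]) ch]
      simp only [pvSegs, if_neg hb]
      simp

theorem pvCap_eq (w : List Char) :
    pvCapitalize w = PySem.Chars.upper (w.take 1) ++ PySem.Chars.lower (w.drop 1) := by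
  cases w with
  | nil => simp [pvCapitalize, PySem.Chars.upper, PySem.Chars.lower]
  | cons c r => simp [pvCapitalize, PySem.Chars.upper, PySem.Chars.lower]

-- ===== VERDICT (by name: the statement is the Claim_ definition above) =====
theorem format_holder_metric_label_py_spec : Claim_equal_format_holder_metric_label_py := by
  intro value _
  unfold Spec_format_holder_metric_label_py format_holder_metric_label_py format_holder_metric_label_py_alt
  cases h : PySem.Chars.strip (PySem.Chars.replace value.toList ['_'] [' ']) with
  | nil => rfl
  | cons c0 rest =>
    simp only []
    have hA := pvA_eq rest [] [] c0
    simp only [List.nil_append] at hA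
    rw [hA, pvB_eq c0 rest, pvSegs_cons_head_tail]
    congr 1
    congr 1
    exact List.map_congr_left (fun w _ => pvCap_eq w)
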